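-- pv_equiv track=rewrite | github.com/ZeekPower100/The-Power100-Experience | thumbnail-system/scripts/server/cover-art-reactor-prototype.py | make_cover_art_lines
-- ===== SOURCE A (Python) =====
-- def make_cover_art_lines(hook_title):
--     upper = hook_title.upper().strip().rstrip('.').rstrip('?').strip()
--     for prefix in ('THE ', 'A ', 'AN ', 'WHY ', 'HOW ', 'WHAT '):
--         if upper.startswith(prefix):
--             upper = upper[len(prefix):]
--             break
--     if len(upper) <= 18:
--         return [upper]
--     mid = len(upper) // 2
--     best_split, best_dist = None, 999
--     for i, ch in enumerate(upper):
--         if ch == ' ':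
--             d = abs(i - mid)
--             if d < best_dist:
--                 best_dist, best_split = d, i
--     if best_split:
--         return [upper[:best_split], upper[best_split + 1:]]
--     return [upper]
-- ===== SOURCE B (Python) =====
-- def make_cover_art_lines(hook_title):
--     upper = hook_title.upper().strip().rstrip('.').rstrip('?').strip()
--     for prefix in ('THE ', 'A ', 'AN ', 'WHY ', 'HOW ', 'WHAT '):
--         if upper.startswith(prefix):
--             upper = upper[len(prefix):]
--             break
--     if len(upper) <= 18:
--         return [upper]
--     mid = len(upper) // 2
--     best_split = None
--     # outward search from the middle: nearest space wins, left candidate first on ties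
--     for d in range(999):
--         left = mid - d
--         if left >= 0 and upper[left] == ' ':
--             best_split = left
--             break
--         right = mid + d
--         if right < len(upper) and upper[right] == ' ':
--             best_split = right
--             break
--     if best_split:
--         return [upper[:best_split], upper[best_split + 1:]]
--     return [upper]
-- ===== Notes on version B (the rewrite author's own statement) =====
-- stated objective: faster
-- what changed: The full left-to-right scan that tracks (best_split, best_dist) over every character is replaced by an outward search from the midpoint that probes mid-d then mid+d for growing d and stops at the first space found.
import Mathlib
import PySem

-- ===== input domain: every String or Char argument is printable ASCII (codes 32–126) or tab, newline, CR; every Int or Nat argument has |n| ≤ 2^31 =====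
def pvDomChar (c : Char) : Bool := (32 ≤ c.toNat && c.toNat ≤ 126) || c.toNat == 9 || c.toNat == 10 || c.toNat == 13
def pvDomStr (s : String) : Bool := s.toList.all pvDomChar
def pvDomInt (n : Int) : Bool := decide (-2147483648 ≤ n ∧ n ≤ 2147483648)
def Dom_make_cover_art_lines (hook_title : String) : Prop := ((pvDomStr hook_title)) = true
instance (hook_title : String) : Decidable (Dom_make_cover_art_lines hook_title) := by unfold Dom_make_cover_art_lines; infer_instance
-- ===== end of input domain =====

-- B replaces A's full left-to-right best-distance scan with an outward search from the
-- midpoint (probe mid-d, then mid+d, for growing d; stop at the first space); same result.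

-- ===== PORT A =====
-- hand port of s.rstrip(chars): drop trailing characters that are in chars (exact for ASCII char sets)
def pvRstripChars (s : List Char) (chars : List Char) : List Char :=
  (s.reverse.dropWhile (· ∈ chars)).reverse

-- the 'for prefix in (…): if upper.startswith(prefix): upper = upper[len(prefix):]; break' loop
def pvPrefixLoop : List (List Char) → List Char → List Char
  | [], u => u
  | p :: ps, u =>
      if PySem.Chars.startswith u p then PySem.List.slice u (some (p.length : Int)) none
      else pvPrefixLoop ps u

-- shared normalization pipeline (identical code in A and in B)
def pvNormalize (hook_title : String) : List Char :=
  let u := PySem.Chars.strip (PySem.Chars.upper hook_title.toList)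
  let u := pvRstripChars u ['.']
  let u := pvRstripChars u ['?']
  let u := PySem.Chars.strip u
  pvPrefixLoop [['T','H','E',' '], ['A',' '], ['A','N',' '], ['W','H','Y',' '], ['H','O','W',' '], ['W','H','A','T',' ']] u

-- one iteration of A's 'for i, ch in enumerate(upper)' body on state (best_split, best_dist)
def pvAStep (mid : Int) (st : Option Int × Int) (p : Int × Char) : Option Int × Int :=
  if p.2 = ' ' then
    if |p.1 - mid| < st.2 then (some p.1, |p.1 - mid|) else st
  else st

def make_cover_art_lines (hook_title : String) : List String :=
  let upper := pvNormalize hook_title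
  if upper.length ≤ 18 then [String.ofList upper]
  else
    let mid := PySem.Int.floordiv upper.length 2
    let best := ((PySem.List.enumerate upper 0).foldl (pvAStep mid) (none, 999)).1
    match best with
    | some i =>
        if i ≠ 0 then
          [String.ofList (PySem.List.slice upper none (some i)),
           String.ofList (PySem.List.slice upper (some (i + 1)) none)]
        else [String.ofList upper]
    | none => [String.ofList upper]

-- ===== PORT B =====
-- 'for d in range(999): left = mid-d; if left >= 0 and upper[left]==' ': break; right = mid+d; …'
def pvSearchOut (s : List Char) (mid : Int) (d : Nat) : Option Int :=
  if d < 999 then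
    let left := mid - d
    if 0 ≤ left ∧ PySem.List.pyGet? s left = some ' ' then some left
    else
      let right := mid + d
      if (right < (s.length : Int)) ∧ PySem.List.pyGet? s right = some ' ' then some right
      else pvSearchOut s mid (d + 1)
  else none
termination_by 999 - d

def make_cover_art_lines_alt (hook_title : String) : List String :=
  let upper := pvNormalize hook_title
  if upper.length ≤ 18 then [String.ofList upper]
  else
    let mid := PySem.Int.floordiv upper.length 2
    let best := pvSearchOut upper mid 0
    match best with
    | some i =>
        if i ≠ 0 then
          [String.ofList (PySem.List.slice upper none (some i)),
           String.ofList (PySem.List.slice upper (some (i + 1)) none)]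
        else [String.ofList upper]
    | none => [String.ofList upper]

-- ===== PRECONDITION & SPEC =====
def Spec_make_cover_art_lines (hook_title : String) (out : List String) : Prop := out = make_cover_art_lines_alt hook_title
instance (hook_title : String) (out : List String) : Decidable (Spec_make_cover_art_lines hook_title out) := by unfold Spec_make_cover_art_lines; infer_instance

-- ===== CLAIM (what is proved, stated in full; the proofs are below) =====
def Claim_equal_make_cover_art_lines : Prop := ∀ (hook_title : String), Dom_make_cover_art_lines hook_title → Spec_make_cover_art_lines hook_title (make_cover_art_lines hook_title)

-- ===== LEMMAS AND PROOFS =====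

-- 'j is a space position of s'
def pvSp (s : List Char) (j : Nat) : Prop := s[j]? = some ' '

-- invariant of A's fold after the first k characters
def pvInv (s : List Char) (m k : Nat) (st : Option Int × Int) : Prop :=
  (st = (none, 999) ∧ ∀ j < k, pvSp s j → (999 : Int) ≤ |(j : Int) - m|)
  ∨ (∃ i, i < k ∧ pvSp s i ∧ st = (some (i : Int), |(i : Int) - m|) ∧ |(i : Int) - m| < 999
      ∧ (∀ j < k, pvSp s j → |(i : Int) - m| ≤ |(j : Int) - m|)
      ∧ (∀ j < i, pvSp s j → |(i : Int) - m| < |(j : Int) - m|))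

lemma pv_abs_sub_nat (j m : Nat) : |(j : Int) - m| = ((max j m - min j m : Nat) : Int) := by
  rcases le_total j m with h | h
  · rw [abs_of_nonpos (by omega)]; omega
  · rw [abs_of_nonneg (by omega)]; omega

lemma pvInv_step (s : List Char) (m k : Nat) (st : Option Int × Int) (c : Char)
    (hc : s[k]? = some c) (h : pvInv s m k st) :
    pvInv s m (k + 1) (pvAStep m st ((k : Int), c)) := by
  have hxlt : ∀ j, j < k + 1 → j = k ∨ j < k := by omega
  unfold pvAStep
  by_cases hsp : c = ' '
  · simp only [hsp, if_true]
    rcases h with ⟨hst, hall⟩ | ⟨i, hik, hspi, hst, hlt, hmin, hfirst⟩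
    · rw [hst]
      by_cases hd : |(k : Int) - m| < 999
      · right; refine ⟨k, by omega, by simpa [pvSp, hsp] using hc, by simp [hd], hd, ?_, ?_⟩
        · intro j hj hspj
          rcases hxlt j hj with rfl | hj'
          · exact le_refl _
          · exact le_trans (le_of_lt hd) (hall j hj' hspj)
        · intro j hj hspj; exact lt_of_lt_of_le hd (hall j hj hspj)
      · left
        refine ⟨by simp [hd], ?_⟩
        intro j hj hspj
        rcases hxlt j hj with rfl | hj'
        · omega
        · exact hall j hj' hspj
    · rw [hst]
      by_cases hd : |(k : Int) - m| < |(i : Int) - m|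
      · right
        refine ⟨k, by omega, by simpa [pvSp, hsp] using hc, by simp [hd], lt_trans hd hlt, ?_, ?_⟩
        · intro j hj hspj
          rcases hxlt j hj with rfl | hj'
          · exact le_refl _
          · exact le_trans (le_of_lt hd) (hmin j hj' hspj)
        · intro j hj hspj
          exact lt_of_lt_of_le hd (hmin j (by omega) hspj)
      · right
        refine ⟨i, by omega, hspi, by simp [hd], hlt, ?_, hfirst⟩
        intro j hj hspj
        rcases hxlt j hj with rfl | hj'
        · omega
        · exact hmin j hj' hspj
  · simp only [if_neg hsp]
    rcases h with ⟨hst, hall⟩ | ⟨i, hik, hspi, hst, hlt, hmin, hfirst⟩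
    · left
      refine ⟨hst, ?_⟩
      intro j hj hspj
      rcases hxlt j hj with rfl | hj'
      · exact absurd (by simpa [pvSp, hc] using hspj) hsp
      · exact hall j hj' hspj
    · right
      refine ⟨i, by omega, hspi, hst, hlt, ?_, hfirst⟩
      intro j hj hspj
      rcases hxlt j hj with rfl | hj'
      · exact absurd (by simpa [pvSp, hc] using hspj) hsp
      · exact hmin j hj' hspj

lemma pvInv_fold (s : List Char) (m : Nat) :
    ∀ (t : List Char) (k : Nat) (st : Option Int × Int), s.drop k = t → pvInv s m k st →
      pvInv s m (k + t.length) (List.foldl (pvAStep m) st (PySem.List.enumerate t (k : Int))) := by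
  intro t
  induction t with
  | nil => intro k st _ h; simpa using h
  | cons c t' ih =>
      intro k st hdrop h
      have hck : s[k]? = some c := by
        have h0 : (s.drop k)[0]? = s[k + 0]? := List.getElem?_drop
        rw [hdrop] at h0; simpa using h0.symm
      have hdrop' : s.drop (k + 1) = t' := by
        have : s.drop (k + 1) = (s.drop k).drop 1 := by rw [List.drop_drop]
        rw [this, hdrop]; rfl
      rw [PySem.List.enumerate_cons, List.foldl_cons]
      have := ih (k + 1) (pvAStep m st ((k : Int), c)) hdrop' (pvInv_step s m k st c hck h)
      have hcast : ((k : Int) + 1) = ((k + 1 : Nat) : Int) := by push_cast; ring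
      rw [hcast]
      simpa [Nat.add_comm, Nat.add_assoc, Nat.add_left_comm] using this

-- final-state invariant of A's fold
lemma pvA_final (s : List Char) (m : Nat) :
    pvInv s m s.length (List.foldl (pvAStep m) (none, 999) (PySem.List.enumerate s 0)) := by
  have := pvInv_fold s m s 0 (none, 999) (by simp) (Or.inl ⟨rfl, by omega⟩)
  simpa using this

lemma pv_sp_lt_length (s : List Char) (j : Nat) (h : pvSp s j) : j < s.length := by
  unfold pvSp at h
  exact (List.getElem?_eq_some_iff.mp h).1

-- the outward search agrees with A's fold, given that no space lies at distance < d
lemma pvSearch_eq (s : List Char) (m : Nat) :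
    ∀ (fuel d : Nat), fuel = 999 - d →
      (∀ j, pvSp s j → (d : Int) ≤ |(j : Int) - m|) →
      pvSearchOut s (m : Int) d =
        (List.foldl (pvAStep m) (none, 999) (PySem.List.enumerate s 0)).1 := by
  intro fuel
  induction fuel with
  | zero =>
      intro d hfuel hinv
      have hd : 999 ≤ d := by omega
      rw [pvSearchOut, if_neg (by omega)]
      rcases pvA_final s m with ⟨hst, _⟩ | ⟨i, _, hspi, hst, hlt, _, _⟩
      · rw [hst]
      · exfalso
        have := hinv i hspi
        omega
  | succ fuel ih =>
      intro d hfuel hinv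
      have hd : d < 999 := by omega
      rw [pvSearchOut, if_pos hd]
      rcases pvA_final s m with ⟨hst, hall⟩ | ⟨i, _, hspi, hst, hlt, hmin, hfirst⟩
      · -- no space with distance < 999 anywhere: both candidate probes fail, recursion bottoms out
        have hleft : ¬ (0 ≤ (m : Int) - d ∧ PySem.List.pyGet? s ((m : Int) - d) = some ' ') := by
          rintro ⟨h0, hsp'⟩
          have hdm : d ≤ m := by omega
          have hcast : (m : Int) - d = ((m - d : Nat) : Int) := by omega
          rw [hcast, PySem.List.pyGet?_natCast] at hsp'
          have := hall (m - d) (pv_sp_lt_length s _ hsp') hsp'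
          rw [pv_abs_sub_nat] at this; omega
        have hright : ¬ (((m : Int) + d < (s.length : Int)) ∧ PySem.List.pyGet? s ((m : Int) + d) = some ' ') := by
          rintro ⟨h0, hsp'⟩
          have hcast : (m : Int) + d = ((m + d : Nat) : Int) := by push_cast; ring
          rw [hcast, PySem.List.pyGet?_natCast] at hsp'
          have := hall (m + d) (pv_sp_lt_length s _ hsp') hsp'
          rw [pv_abs_sub_nat] at this; omega
        rw [if_neg hleft, if_neg hright]
        refine ih (d + 1) (by omega) ?_
        intro j hspj
        have hj999 := hall j (pv_sp_lt_length s _ hspj) hspj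
        omega
      · -- a best split i exists; its distance D := |i - m| satisfies d ≤ D
        rw [hst]
        have hiD := hinv i hspi
        have hin := pv_sp_lt_length s _ hspi
        by_cases hleft : 0 ≤ (m : Int) - d ∧ PySem.List.pyGet? s ((m : Int) - d) = some ' '
        · rw [if_pos hleft]
          -- the left candidate m - d is a space at distance d, so D = d and i = m - d
          obtain ⟨h0, hsp'⟩ := hleft
          have hdm : d ≤ m := by omega
          have hcast : (m : Int) - d = ((m - d : Nat) : Int) := by omega
          rw [hcast, PySem.List.pyGet?_natCast] at hsp'
          have hDle : |(i : Int) - m| ≤ (d : Int) := by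
            have := hmin (m - d) (pv_sp_lt_length s _ hsp') hsp'
            rw [pv_abs_sub_nat (m - d) m] at this; omega
          have hDeq : |(i : Int) - m| = (d : Int) := le_antisymm hDle hiD
          -- i is m - d or m + d; if i = m + d with d > 0, the left space m - d < i contradicts first-minimality
          have hii : i = m - d ∨ i = m + d := by
            rw [pv_abs_sub_nat] at hDeq; omega
          rcases hii with rfl | rfl
          · rw [hcast]
          · by_cases hd0 : d = 0
            · subst hd0; rw [hcast]; norm_num
            · exfalso
              have := hfirst (m - d) (by omega) hsp'
              rw [pv_abs_sub_nat (m - d) m, hDeq] at this; omega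
        · rw [if_neg hleft]
          by_cases hright : ((m : Int) + d < (s.length : Int)) ∧ PySem.List.pyGet? s ((m : Int) + d) = some ' '
          · rw [if_pos hright]
            obtain ⟨h0, hsp'⟩ := hright
            have hcast : (m : Int) + d = ((m + d : Nat) : Int) := by push_cast; ring
            rw [hcast, PySem.List.pyGet?_natCast] at hsp'
            have hDle : |(i : Int) - m| ≤ (d : Int) := by
              have := hmin (m + d) (pv_sp_lt_length s _ hsp') hsp'
              rw [pv_abs_sub_nat (m + d) m] at this; omega
            have hDeq : |(i : Int) - m| = (d : Int) := le_antisymm hDle hiD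
            have hii : i = m - d ∧ d ≤ m ∨ i = m + d := by
              rw [pv_abs_sub_nat] at hDeq; omega
            rcases hii with ⟨rfl, hdm⟩ | rfl
            · -- impossible: the left probe would have hit
              exfalso
              apply hleft
              have hcast' : (m : Int) - d = ((m - d : Nat) : Int) := by omega
              rw [hcast', PySem.List.pyGet?_natCast]
              exact ⟨by omega, hspi⟩
            · rw [hcast]
          · rw [if_neg hright, ← hst]
            refine ih (d + 1) (by omega) ?_
            -- neither probe hit: no space at distance exactly d, so all spaces are at distance ≥ d + 1
            intro j hspj
            have hjd := hinv j hspj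
            by_contra hlt'
            have hjn := pv_sp_lt_length s _ hspj
            have hjeq : (j : Int) = (m : Int) - d ∨ (j : Int) = (m : Int) + d := by
              rw [pv_abs_sub_nat] at hjd hlt'; omega
            rcases hjeq with hj | hj
            · apply hleft
              have : (m : Int) - d = ((j : Nat) : Int) := by omega
              rw [this, PySem.List.pyGet?_natCast]
              exact ⟨by omega, hspj⟩
            · apply hright
              have : (m : Int) + d = ((j : Nat) : Int) := by omega
              rw [this, PySem.List.pyGet?_natCast]
              exact ⟨by omega, hspj⟩

-- ===== VERDICT (by name: the statement is the Claim_ definition above) =====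
theorem make_cover_art_lines_spec : Claim_equal_make_cover_art_lines := by
  intro hook_title _
  unfold Spec_make_cover_art_lines make_cover_art_lines make_cover_art_lines_alt
  simp only []
  generalize pvNormalize hook_title = upper
  by_cases hlen : upper.length ≤ 18
  · rw [if_pos hlen, if_pos hlen]
  · rw [if_neg hlen, if_neg hlen]
    have hmid : PySem.Int.floordiv (upper.length : Int) 2 = ((upper.length / 2 : Nat) : Int) :=
      PySem.Int.floordiv_natCast upper.length 2
    rw [hmid, pvSearch_eq upper (upper.length / 2) 999 0 rfl
      (fun j _ => by exact_mod_cast abs_nonneg ((j : Int) - (upper.length / 2 : Nat)))]
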